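-- pv_equiv track=rewrite | github.com/jeayoungho97/AGV | Web+Commumication+PathAlgorithm/python/planner_node/main.py | inflate_obstacles
-- ===== SOURCE A (Python) =====
-- from typing import Any, Dict, List, Optional, Tuple
--
-- def inflate_obstacles(
--     obstacles: List[Tuple[int, int]],
--     width: int,
--     height: int,
--     clearance_cells: int,
-- ) -> set[Tuple[int, int]]:
--     """
--     clearance_cells 반경 만큼 장애물을 팽창(inflate)해서 안전거리 확보.
--     """
--     obs = set(obstacles)
--     if clearance_cells <= 0:
--         return obs
--
--     inflated = set()
--     for (ox, oy) in obs:
--         for dx in range(-clearance_cells, clearance_cells + 1):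
--             for dy in range(-clearance_cells, clearance_cells + 1):
--                 nx, ny = ox + dx, oy + dy
--                 if 0 <= nx < width and 0 <= ny < height:
--                     inflated.add((nx, ny))
--     return inflated
-- ===== SOURCE B (Python) =====
-- def _gaps(ivs, cur, y1):
--     # ys in [cur, y1] not covered by the sorted, disjoint intervals ivs, ascending
--     res = []
--     for lo, hi in ivs:
--         if hi < cur:
--             continue
--         if y1 < lo:
--             break
--         res.extend(range(cur, min(lo, y1 + 1)))
--         cur = hi + 1
--         if cur > y1:
--             return res
--     res.extend(range(cur, y1 + 1))
--     return res
--
--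
-- def _insert(ivs, lo, hi):
--     # insert [lo, hi] into the sorted, disjoint interval list ivs, merging overlaps
--     res = []
--     i = 0
--     while i < len(ivs) and ivs[i][1] < lo - 1:
--         res.append(ivs[i])
--         i += 1
--     while i < len(ivs) and ivs[i][0] <= hi + 1:
--         lo = min(lo, ivs[i][0])
--         hi = max(hi, ivs[i][1])
--         i += 1
--     res.append((lo, hi))
--     res.extend(ivs[i:])
--     return res
--
--
-- def inflate_obstacles(obstacles, width, height, clearance_cells):
--     if clearance_cells <= 0:
--         return set(obstacles)
--     out = []
--     cols = {}  # column x -> sorted disjoint list of already-covered y-intervals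
--     for ox, oy in dict.fromkeys(obstacles):
--         x0, x1 = max(0, ox - clearance_cells), min(width - 1, ox + clearance_cells)
--         y0, y1 = max(0, oy - clearance_cells), min(height - 1, oy + clearance_cells)
--         if x0 > x1 or y0 > y1:
--             continue
--         for x in range(x0, x1 + 1):
--             ivs = cols.get(x, [])
--             out.extend((x, y) for y in _gaps(ivs, y0, y1))
--             cols[x] = _insert(ivs, y0, y1)
--     return set(out)
-- ===== Notes on version B (the rewrite author's own statement) =====
-- stated objective: alternative
-- what changed: Instead of enumerating the full (2c+1)^2 square around every obstacle with a per-cell bounds test and per-cell set membership, B keeps a per-column map of merged covered-y intervals and, for each obstacle's clipped rectangle, emits only the not-yet-covered runs by walking the column's interval list, so no grid cell is ever enumerated twice.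
import Mathlib
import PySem

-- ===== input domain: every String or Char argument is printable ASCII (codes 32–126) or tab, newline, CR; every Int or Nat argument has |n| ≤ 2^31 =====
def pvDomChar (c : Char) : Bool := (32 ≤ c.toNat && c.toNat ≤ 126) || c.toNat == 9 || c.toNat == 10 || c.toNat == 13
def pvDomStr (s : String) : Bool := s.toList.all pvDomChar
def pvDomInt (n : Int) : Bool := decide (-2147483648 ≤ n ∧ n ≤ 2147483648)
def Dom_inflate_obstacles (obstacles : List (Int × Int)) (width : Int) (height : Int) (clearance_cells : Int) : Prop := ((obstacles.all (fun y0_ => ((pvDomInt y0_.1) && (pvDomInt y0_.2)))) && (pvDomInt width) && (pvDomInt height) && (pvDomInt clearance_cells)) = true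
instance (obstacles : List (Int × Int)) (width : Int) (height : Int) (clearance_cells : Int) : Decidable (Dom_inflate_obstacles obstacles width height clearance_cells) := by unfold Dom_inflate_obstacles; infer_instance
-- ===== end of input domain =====

-- B replaces A's per-obstacle (2c+1)^2 cell enumeration (with a per-cell bounds test and
-- per-cell set membership) by a per-column map of merged covered-y intervals: each clipped
-- rectangle emits only its not-yet-covered cells by walking the column's interval list, so
-- no cell is ever re-visited; same returned set. Python `set` iteration order is not
-- modelled: both ports iterate the distinct obstacles in first-occurrence order (outputs
-- are compared as finite sets).

-- ===== PORT A =====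
def inflate_obstacles (obstacles : List (Int × Int)) (width : Int) (height : Int) (clearance_cells : Int) : List (Int × Int) :=
  let obs : PySem.Set (Int × Int) := PySem.Set.ofList obstacles
  if clearance_cells ≤ 0 then obs
  else
    obs.foldl (fun inflated p =>
      (PySem.List.pyRange (-clearance_cells) (clearance_cells + 1) 1).foldl (fun inflated dx =>
        (PySem.List.pyRange (-clearance_cells) (clearance_cells + 1) 1).foldl (fun inflated dy =>
          let nx := p.1 + dx
          let ny := p.2 + dy
          if (0 ≤ nx ∧ nx < width) ∧ (0 ≤ ny ∧ ny < height) then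
            PySem.Set.add inflated (nx, ny)
          else inflated) inflated) inflated) PySem.Set.empty

-- ===== PORT B =====
-- _gaps(ivs, cur, y1): the ys in [cur, y1] not covered by the sorted disjoint intervals ivs
def pvGaps : List (Int × Int) → Int → Int → List Int
  | [], cur, y1 => PySem.List.pyRange cur (y1 + 1) 1
  | (lo, hi) :: t, cur, y1 =>
    if hi < cur then pvGaps t cur y1                                   -- continue
    else if y1 < lo then PySem.List.pyRange cur (y1 + 1) 1             -- break, then final extend
    else PySem.List.pyRange cur (min lo (y1 + 1)) 1 ++
         (if hi + 1 > y1 then [] else pvGaps t (hi + 1) y1)            -- early return / loop on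

-- second while loop of _insert: absorb overlapping intervals
def pvMerge : List (Int × Int) → Int → Int → List (Int × Int)
  | [], lo, hi => [(lo, hi)]
  | (a, b) :: t, lo, hi =>
    if a ≤ hi + 1 then pvMerge t (min lo a) (max hi b) else (lo, hi) :: (a, b) :: t

-- _insert(ivs, lo, hi): first while loop copies intervals strictly left of [lo, hi]
def pvInsert : List (Int × Int) → Int → Int → List (Int × Int)
  | [], lo, hi => [(lo, hi)]
  | (a, b) :: t, lo, hi =>
    if b < lo - 1 then (a, b) :: pvInsert t lo hi else pvMerge ((a, b) :: t) lo hi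

def inflate_obstacles_alt (obstacles : List (Int × Int)) (width : Int) (height : Int) (clearance_cells : Int) : List (Int × Int) :=
  if clearance_cells ≤ 0 then PySem.Set.ofList obstacles
  else
    let st :=
      (PySem.List.dedup obstacles).foldl (fun st p =>
        let x0 := max 0 (p.1 - clearance_cells)
        let x1 := min (width - 1) (p.1 + clearance_cells)
        let y0 := max 0 (p.2 - clearance_cells)
        let y1 := min (height - 1) (p.2 + clearance_cells)
        if x0 > x1 ∨ y0 > y1 then st
        else
          (PySem.List.pyRange x0 (x1 + 1) 1).foldl (fun st x =>
            let ivs := st.2.getD x []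
            (st.1 ++ (pvGaps ivs y0 y1).map (fun y => (x, y)),
             st.2.insert x (pvInsert ivs y0 y1))) st)
        (([] : List (Int × Int)), (PySem.Dict.empty : PySem.Dict Int (List (Int × Int))))
    PySem.Set.ofList st.1

-- ===== PRECONDITION & SPEC =====
def Spec_inflate_obstacles (obstacles : List (Int × Int)) (width : Int) (height : Int) (clearance_cells : Int) (out : List (Int × Int)) : Prop := out = inflate_obstacles_alt obstacles width height clearance_cells
instance (obstacles : List (Int × Int)) (width : Int) (height : Int) (clearance_cells : Int) (out : List (Int × Int)) : Decidable (Spec_inflate_obstacles obstacles width height clearance_cells out) := by unfold Spec_inflate_obstacles; infer_instance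

-- ===== CLAIM (what is proved, stated in full; the proofs are below) =====
def Claim_equal_inflate_obstacles : Prop := ∀ (obstacles : List (Int × Int)) (width : Int) (height : Int) (clearance_cells : Int), Dom_inflate_obstacles obstacles width height clearance_cells → Spec_inflate_obstacles obstacles width height clearance_cells (inflate_obstacles obstacles width height clearance_cells)

-- ===== LEMMAS AND PROOFS =====

-- `covB ivs y` : the interval list covers y
def covB (ivs : List (Int × Int)) (y : Int) : Bool :=
  ivs.any fun q => decide (q.1 ≤ y) && decide (y ≤ q.2)

-- well-formed interval list: nonempty intervals, strictly increasing with gaps ≥ 1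
def ivsOK : List (Int × Int) → Prop
  | [] => True
  | q :: t => q.1 ≤ q.2 ∧ (∀ r ∈ t, q.2 + 1 < r.1) ∧ ivsOK t

-- the invariant tying A's growing set to B's output list and per-column interval map
def pvInv (s : List (Int × Int)) (d : PySem.Dict Int (List (Int × Int))) : Prop :=
  s.Nodup ∧ (∀ x, ivsOK (d.getD x [])) ∧ ∀ x y, ((x, y) ∈ s ↔ covB (d.getD x []) y = true)

-- shifting an integer range
theorem pv_pyRange_map_shift (t a b : Int) :
    (PySem.List.pyRange a b 1).map (fun d => t + d) = PySem.List.pyRange (t + a) (t + b) 1 := by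
  simp only [PySem.List.pyRange_one, List.map_map]
  have h : t + b - (t + a) = b - a := by ring
  rw [h]
  apply List.map_congr_left
  intro k _
  simp; ring

-- folding with a constant guard: pull the guard out of the loop
theorem pv_guard_split {σ : Type} (l : List Int) (P : Prop) [Decidable P]
    (Q : Int → Prop) [DecidablePred Q] (f : σ → Int → σ) (acc : σ) :
    l.foldl (fun s y => if P ∧ Q y then f s y else s) acc
      = if P then l.foldl (fun s y => if Q y then f s y else s) acc else acc := by
  by_cases hP : P
  · simp [hP]
  · simp only [hP, if_false]
    induction l generalizing acc with
    | nil => rfl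
    | cons y ys ih => simpa [hP] using ih

-- folding a guarded body over a range = folding the unguarded body over the clipped range
theorem pv_clip_foldl {σ : Type} (f : σ → Int → σ) (lo hi : Int) :
    ∀ (n : ℕ) (a b : Int), (b - a).toNat = n → ∀ (acc : σ),
      (PySem.List.pyRange a b 1).foldl (fun s x => if lo ≤ x ∧ x < hi then f s x else s) acc
        = (PySem.List.pyRange (max a lo) (min b hi) 1).foldl f acc := by
  intro n
  induction n with
  | zero =>
    intro a b hn acc
    have hba : b ≤ a := by omega
    rw [PySem.List.pyRange_one_eq_nil hba, PySem.List.pyRange_one_eq_nil (by omega)]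
    rfl
  | succ n ih =>
    intro a b hn acc
    have hab : a < b := by omega
    rw [PySem.List.pyRange_one_cons hab]
    by_cases hg : lo ≤ a ∧ a < hi
    · simp only [List.foldl_cons, if_pos hg]
      rw [ih (a + 1) b (by omega) (f acc a)]
      have h1 : max a lo = a := by omega
      have h2 : max (a + 1) lo = a + 1 := by omega
      have h3 : a < min b hi := by omega
      rw [h1, h2, PySem.List.pyRange_one_cons h3, List.foldl_cons]
    · simp only [List.foldl_cons, if_neg hg]
      rw [ih (a + 1) b (by omega) acc]
      rcases not_and_or.mp hg with hlo | hhi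
      · have h1 : max a lo = max (a + 1) lo := by omega
        rw [h1]
      · rw [PySem.List.pyRange_one_eq_nil (by omega), PySem.List.pyRange_one_eq_nil (by omega)]

-- A's per-obstacle body equals the clipped-rectangle fold
theorem pv_body_eq (width height c ox oy : Int) (acc : PySem.Set (Int × Int)) :
    (PySem.List.pyRange (-c) (c + 1) 1).foldl (fun inflated dx =>
        (PySem.List.pyRange (-c) (c + 1) 1).foldl (fun inflated dy =>
          if (0 ≤ ox + dx ∧ ox + dx < width) ∧ (0 ≤ oy + dy ∧ oy + dy < height) then
            PySem.Set.add inflated (ox + dx, oy + dy)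
          else inflated) inflated) acc
      = (PySem.List.pyRange (max 0 (ox - c)) (min (width - 1) (ox + c) + 1) 1).foldl (fun inflated x =>
          (PySem.List.pyRange (max 0 (oy - c)) (min (height - 1) (oy + c) + 1) 1).foldl (fun inflated y =>
            PySem.Set.add inflated (x, y)) inflated) acc := by
  have hshift :
      (PySem.List.pyRange (-c) (c + 1) 1).foldl (fun inflated dx =>
        (PySem.List.pyRange (-c) (c + 1) 1).foldl (fun inflated dy =>
          if (0 ≤ ox + dx ∧ ox + dx < width) ∧ (0 ≤ oy + dy ∧ oy + dy < height) then
            PySem.Set.add inflated (ox + dx, oy + dy)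
          else inflated) inflated) acc
      = (PySem.List.pyRange (ox - c) (ox + c + 1) 1).foldl (fun inflated nx =>
          (PySem.List.pyRange (oy - c) (oy + c + 1) 1).foldl (fun inflated ny =>
            if (0 ≤ nx ∧ nx < width) ∧ (0 ≤ ny ∧ ny < height) then
              PySem.Set.add inflated (nx, ny)
            else inflated) inflated) acc := by
    have hx : PySem.List.pyRange (ox - c) (ox + c + 1) 1
        = (PySem.List.pyRange (-c) (c + 1) 1).map (fun d => ox + d) := by
      rw [pv_pyRange_map_shift ox (-c) (c + 1)]
      congr 1 <;> ring
    have hy : PySem.List.pyRange (oy - c) (oy + c + 1) 1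
        = (PySem.List.pyRange (-c) (c + 1) 1).map (fun d => oy + d) := by
      rw [pv_pyRange_map_shift oy (-c) (c + 1)]
      congr 1 <;> ring
    rw [hx, hy, List.foldl_map]
    apply PySem.List.foldl_congr_mem
    intro s dx _
    rw [List.foldl_map]
  rw [hshift]
  have hinner : ∀ (nx : Int) (s : PySem.Set (Int × Int)),
      (PySem.List.pyRange (oy - c) (oy + c + 1) 1).foldl (fun inflated ny =>
        if (0 ≤ nx ∧ nx < width) ∧ (0 ≤ ny ∧ ny < height) then
          PySem.Set.add inflated (nx, ny)
        else inflated) s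
      = if 0 ≤ nx ∧ nx < width then
          (PySem.List.pyRange (max 0 (oy - c)) (min (height - 1) (oy + c) + 1) 1).foldl
            (fun inflated y => PySem.Set.add inflated (nx, y)) s
        else s := by
    intro nx s
    rw [pv_guard_split]
    by_cases hnx : 0 ≤ nx ∧ nx < width
    · rw [if_pos hnx, if_pos hnx,
        pv_clip_foldl (fun inflated y => PySem.Set.add inflated (nx, y)) 0 height
          ((oy + c + 1) - (oy - c)).toNat (oy - c) (oy + c + 1) rfl s]
      have h1 : max (oy - c) 0 = max 0 (oy - c) := by omega
      have h2 : min (oy + c + 1) height = min (height - 1) (oy + c) + 1 := by omega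
      rw [h1, h2]
    · rw [if_neg hnx, if_neg hnx]
  calc (PySem.List.pyRange (ox - c) (ox + c + 1) 1).foldl (fun inflated nx =>
          (PySem.List.pyRange (oy - c) (oy + c + 1) 1).foldl (fun inflated ny =>
            if (0 ≤ nx ∧ nx < width) ∧ (0 ≤ ny ∧ ny < height) then
              PySem.Set.add inflated (nx, ny)
            else inflated) inflated) acc
      = (PySem.List.pyRange (ox - c) (ox + c + 1) 1).foldl (fun inflated nx =>
          if 0 ≤ nx ∧ nx < width then
            (PySem.List.pyRange (max 0 (oy - c)) (min (height - 1) (oy + c) + 1) 1).foldl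
              (fun s y => PySem.Set.add s (nx, y)) inflated
          else inflated) acc := by
        apply PySem.List.foldl_congr_mem
        intro s nx _
        exact hinner nx s
    _ = _ := by
        rw [pv_clip_foldl (fun s nx =>
            (PySem.List.pyRange (max 0 (oy - c)) (min (height - 1) (oy + c) + 1) 1).foldl
              (fun t y => PySem.Set.add t (nx, y)) s) 0 width
          ((ox + c + 1) - (ox - c)).toNat (ox - c) (ox + c + 1) rfl acc]
        have h1 : max (ox - c) 0 = max 0 (ox - c) := by omega
        have h2 : min (ox + c + 1) width = min (width - 1) (ox + c) + 1 := by omega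
        rw [h1, h2]

-- trim the upper end of an empty-or-real range
theorem pv_pyRange_max (a m : Int) :
    PySem.List.pyRange a m 1 = PySem.List.pyRange a (max a m) 1 := by
  rcases le_total m a with h | h
  · rw [PySem.List.pyRange_one_eq_nil h, PySem.List.pyRange_one_eq_nil (by omega)]
  · rw [max_eq_right h]

-- head/tail unfolding of coverage
theorem pv_covB_cons (lo hi y : Int) (t : List (Int × Int)) :
    covB ((lo, hi) :: t) y = ((decide (lo ≤ y) && decide (y ≤ hi)) || covB t y) := by
  simp [covB]

-- coverage is false when y misses every interval
theorem pv_covB_false {ivs : List (Int × Int)} {y : Int}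
    (h : ∀ q ∈ ivs, y < q.1 ∨ q.2 < y) : covB ivs y = false := by
  simp only [covB, List.any_eq_false, Bool.and_eq_true, decide_eq_true_eq, not_and]
  intro q hq h1
  rcases h q hq with h2 | h2 <;> omega

-- the gap walk computes exactly the uncovered part of the range
theorem pv_gaps_eq : ∀ (ivs : List (Int × Int)) (cur y1 : Int), ivsOK ivs → cur ≤ y1 + 1 →
    pvGaps ivs cur y1 = (PySem.List.pyRange cur (y1 + 1) 1).filter (fun y => !covB ivs y) := by
  intro ivs
  induction ivs with
  | nil =>
    intro cur y1 _ _
    simp [pvGaps, covB]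
  | cons q t ih =>
    rcases q with ⟨lo, hi⟩
    intro cur y1 hok hcur
    have hokt : ivsOK t := hok.2.2
    have hlohi : lo ≤ hi := hok.1
    have htgt : ∀ r ∈ t, hi + 1 < r.1 := hok.2.1
    by_cases h1 : hi < cur
    · rw [show pvGaps ((lo, hi) :: t) cur y1 = pvGaps t cur y1 from by rw [pvGaps]; simp [h1]]
      rw [ih cur y1 hokt hcur]
      apply List.filter_congr
      intro y hy
      have hy' := (PySem.List.mem_pyRange_one).mp hy
      rw [pv_covB_cons]
      have : decide (y ≤ hi) = false := by simp; omega
      rw [this, Bool.and_false, Bool.false_or]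
    · by_cases h2 : y1 < lo
      · rw [show pvGaps ((lo, hi) :: t) cur y1 = PySem.List.pyRange cur (y1 + 1) 1 from by
          rw [pvGaps]; simp [h1, h2]]
        symm
        apply List.filter_eq_self.mpr
        intro y hy
        have hy' := (PySem.List.mem_pyRange_one).mp hy
        rw [pv_covB_false]
        · rfl
        · intro r hr
          rcases List.mem_cons.mp hr with hr | hr
          · rw [hr]; left; simpa using by omega
          · have := htgt r hr; left; omega
      · -- main branch: cur ≤ hi, lo ≤ y1
        have hcurhi : cur ≤ hi := by omega
        have hloy1 : lo ≤ y1 := by omega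
        have hmin : min lo (y1 + 1) = lo := by omega
        rw [show pvGaps ((lo, hi) :: t) cur y1
              = PySem.List.pyRange cur (min lo (y1 + 1)) 1 ++
                (if hi + 1 > y1 then [] else pvGaps t (hi + 1) y1) from by
          rw [pvGaps]; simp [h1, h2]]
        rw [hmin]
        have hsplit1 : PySem.List.pyRange cur (y1 + 1) 1
            = PySem.List.pyRange cur (max cur lo) 1 ++ PySem.List.pyRange (max cur lo) (y1 + 1) 1 :=
          PySem.List.pyRange_one_append cur (max cur lo) (y1 + 1) (by omega) (by omega)
        have hsplit2 : PySem.List.pyRange (max cur lo) (y1 + 1) 1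
            = PySem.List.pyRange (max cur lo) (min (hi + 1) (y1 + 1)) 1 ++
              PySem.List.pyRange (min (hi + 1) (y1 + 1)) (y1 + 1) 1 :=
          PySem.List.pyRange_one_append _ _ _ (by omega) (by omega)
        rw [hsplit1, hsplit2, List.filter_append, List.filter_append]
        have hp1 : (PySem.List.pyRange cur (max cur lo) 1).filter (fun y => !covB ((lo, hi) :: t) y)
            = PySem.List.pyRange cur lo 1 := by
          rw [pv_pyRange_max cur lo]
          apply List.filter_eq_self.mpr
          intro y hy
          have hy' := (PySem.List.mem_pyRange_one).mp hy
          rw [pv_covB_false]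
          · rfl
          · intro r hr
            rcases List.mem_cons.mp hr with hr | hr
            · rw [hr]; left; simpa using by omega
            · have := htgt r hr; left; omega
        have hp2 : (PySem.List.pyRange (max cur lo) (min (hi + 1) (y1 + 1)) 1).filter
              (fun y => !covB ((lo, hi) :: t) y) = [] := by
          apply List.filter_eq_nil_iff.mpr
          intro y hy
          have hy' := (PySem.List.mem_pyRange_one).mp hy
          rw [pv_covB_cons]
          have ha : decide (lo ≤ y) = true := by simp; omega
          have hb : decide (y ≤ hi) = true := by simp; omega
          rw [ha, hb]
          simp
        have hp3 : (PySem.List.pyRange (min (hi + 1) (y1 + 1)) (y1 + 1) 1).filter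
              (fun y => !covB ((lo, hi) :: t) y)
            = (if hi + 1 > y1 then [] else pvGaps t (hi + 1) y1) := by
          by_cases h3 : hi + 1 > y1
          · rw [if_pos h3, PySem.List.pyRange_one_eq_nil (by omega)]
            rfl
          · rw [if_neg h3, show min (hi + 1) (y1 + 1) = hi + 1 from by omega,
              ih (hi + 1) y1 hokt (by omega)]
            apply List.filter_congr
            intro y hy
            have hy' := (PySem.List.mem_pyRange_one).mp hy
            rw [pv_covB_cons]
            have : decide (y ≤ hi) = false := by simp; omega
            rw [this, Bool.and_false, Bool.false_or]
        rw [hp1, hp2, hp3, List.nil_append]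

-- each interval in a well-formed list is nonempty
theorem pv_ivsOK_le : ∀ (ivs : List (Int × Int)), ivsOK ivs → ∀ q ∈ ivs, q.1 ≤ q.2 := by
  intro ivs
  induction ivs with
  | nil => intro _ q hq; simp at hq
  | cons p t ih =>
    intro hok q hq
    rcases List.mem_cons.mp hq with rfl | hq
    · exact hok.1
    · exact ih hok.2.2 q hq

-- lower bounds on interval starts survive pvMerge
theorem pv_merge_lb (m : Int) : ∀ (ivs : List (Int × Int)) (lo hi : Int), m < lo →
    (∀ q ∈ ivs, m < q.1) → ∀ q ∈ pvMerge ivs lo hi, m < q.1 := by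
  intro ivs
  induction ivs with
  | nil =>
    intro lo hi hm _ q hq
    rw [pvMerge] at hq
    have hq' := List.mem_singleton.mp hq
    subst hq'
    exact hm
  | cons p t ih =>
    rcases p with ⟨a, b⟩
    intro lo hi hm hall q hq
    rw [pvMerge] at hq
    by_cases h : a ≤ hi + 1
    · rw [if_pos h] at hq
      exact ih (min lo a) (max hi b) (by have := hall (a, b) (by simp); simp at this ⊢; omega)
        (fun r hr => hall r (by simp [hr])) q hq
    · rw [if_neg h] at hq
      rcases List.mem_cons.mp hq with rfl | hq
      · exact hm
      · exact hall q hq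

-- lower bounds on interval starts survive pvInsert
theorem pv_insert_lb (m : Int) : ∀ (ivs : List (Int × Int)) (lo hi : Int), m < lo →
    (∀ q ∈ ivs, m < q.1) → ∀ q ∈ pvInsert ivs lo hi, m < q.1 := by
  intro ivs
  induction ivs with
  | nil =>
    intro lo hi hm _ q hq
    rw [pvInsert] at hq
    have hq' := List.mem_singleton.mp hq
    subst hq'
    exact hm
  | cons p t ih =>
    rcases p with ⟨a, b⟩
    intro lo hi hm hall q hq
    rw [pvInsert] at hq
    by_cases h : b < lo - 1
    · rw [if_pos h] at hq
      rcases List.mem_cons.mp hq with hq | hq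
      · exact hq ▸ hall (a, b) (by simp)
      · exact ih lo hi hm (fun r hr => hall r (by simp [hr])) q hq
    · rw [if_neg h] at hq
      exact pv_merge_lb m ((a, b) :: t) lo hi hm hall q hq

-- pvMerge: well-formedness and coverage (needs every remaining interval to reach lo-1)
theorem pv_merge_spec : ∀ (ivs : List (Int × Int)) (lo hi : Int), ivsOK ivs → lo ≤ hi →
    (∀ q ∈ ivs, lo - 1 ≤ q.2) →
    ivsOK (pvMerge ivs lo hi) ∧
      ∀ y, covB (pvMerge ivs lo hi) y = (covB ivs y || (decide (lo ≤ y) && decide (y ≤ hi))) := by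
  intro ivs
  induction ivs with
  | nil =>
    intro lo hi _ hlh _
    rw [pvMerge]
    refine ⟨⟨hlh, by simp, trivial⟩, ?_⟩
    intro y
    simp [covB]
  | cons p t ih =>
    rcases p with ⟨a, b⟩
    intro lo hi hok hlh hreach
    have hab : a ≤ b := hok.1
    have htgt : ∀ r ∈ t, b + 1 < r.1 := hok.2.1
    have hokt : ivsOK t := hok.2.2
    have hblo : lo - 1 ≤ b := hreach (a, b) (by simp)
    rw [pvMerge]
    by_cases h : a ≤ hi + 1
    · rw [if_pos h]
      have hrec := ih (min lo a) (max hi b) hokt (by omega)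
        (fun q hq => by
          have h1 := htgt q hq
          have h2 := pv_ivsOK_le t hokt q hq
          omega)
      refine ⟨hrec.1, ?_⟩
      intro y
      rw [hrec.2 y]
      have hunion : (decide (min lo a ≤ y) && decide (y ≤ max hi b))
          = ((decide (a ≤ y) && decide (y ≤ b)) || (decide (lo ≤ y) && decide (y ≤ hi))) := by
        apply Bool.eq_iff_iff.mpr
        simp only [Bool.and_eq_true, Bool.or_eq_true, decide_eq_true_eq]
        omega
      rw [show covB ((a, b) :: t) y = ((decide (a ≤ y) && decide (y ≤ b)) || covB t y) from by
        simp [covB]]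
      rw [hunion]
      cases covB t y <;> cases decide (a ≤ y) && decide (y ≤ b) <;>
        cases decide (lo ≤ y) && decide (y ≤ hi) <;> rfl
    · rw [if_neg h]
      refine ⟨⟨hlh, ?_, hok⟩, ?_⟩
      · intro r hr
        rcases List.mem_cons.mp hr with hr | hr
        · simp [hr]; omega
        · have := htgt r hr; omega
      · intro y
        simp only [covB, List.any_cons]
        cases decide (lo ≤ y) && decide (y ≤ hi) <;>
          cases decide (a ≤ y) && decide (y ≤ b) <;> cases List.any t _ <;> rfl

-- pvInsert: well-formedness and coverage
theorem pv_insert_spec : ∀ (ivs : List (Int × Int)) (lo hi : Int), ivsOK ivs → lo ≤ hi →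
    ivsOK (pvInsert ivs lo hi) ∧
      ∀ y, covB (pvInsert ivs lo hi) y = (covB ivs y || (decide (lo ≤ y) && decide (y ≤ hi))) := by
  intro ivs
  induction ivs with
  | nil =>
    intro lo hi _ hlh
    rw [pvInsert]
    refine ⟨⟨hlh, by simp, trivial⟩, ?_⟩
    intro y
    simp [covB]
  | cons p t ih =>
    rcases p with ⟨a, b⟩
    intro lo hi hok hlh
    have hab : a ≤ b := hok.1
    have htgt : ∀ r ∈ t, b + 1 < r.1 := hok.2.1
    have hokt : ivsOK t := hok.2.2
    rw [pvInsert]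
    by_cases h : b < lo - 1
    · rw [if_pos h]
      have hrec := ih lo hi hokt hlh
      refine ⟨⟨hab, ?_, hrec.1⟩, ?_⟩
      · exact pv_insert_lb (b + 1) t lo hi (by omega) htgt
      · intro y
        simp only [covB, List.any_cons]
        rw [show (t.any fun q => decide (q.1 ≤ y) && decide (y ≤ q.2)) = covB t y from rfl]
        have := hrec.2 y
        rw [show (pvInsert t lo hi).any (fun q => decide (q.1 ≤ y) && decide (y ≤ q.2))
              = covB (pvInsert t lo hi) y from rfl, this]
        cases decide (a ≤ y) && decide (y ≤ b) <;> cases covB t y <;>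
          cases decide (lo ≤ y) && decide (y ≤ hi) <;> rfl
    · rw [if_neg h]
      apply pv_merge_spec ((a, b) :: t) lo hi hok hlh
      intro q hq
      rcases List.mem_cons.mp hq with hq | hq
      · simp [hq]; omega
      · have h1 := htgt q hq
        have h2 := pv_ivsOK_le t hokt q hq
        omega

-- A's column fold appends exactly the cells not already present, in y order
theorem pv_acol : ∀ (ys : List Int), ys.Nodup → ∀ (s : List (Int × Int)) (x : Int),
    ys.foldl (fun s y => PySem.Set.add s (x, y)) s
      = s ++ (ys.filter (fun y => !decide ((x, y) ∈ s))).map (fun y => (x, y)) := by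
  intro ys
  induction ys with
  | nil => intro _ s x; simp
  | cons y t ih =>
    intro hnd s x
    have hyt : y ∉ t := (List.nodup_cons.mp hnd).1
    have hndt : t.Nodup := (List.nodup_cons.mp hnd).2
    simp only [List.foldl_cons, List.filter_cons]
    by_cases hmem : (x, y) ∈ s
    · rw [show PySem.Set.add s (x, y) = s from by simp [PySem.Set.add, PySem.Set.contains, hmem]]
      rw [ih hndt s x]
      simp [hmem]
    · rw [show PySem.Set.add s (x, y) = s ++ [(x, y)] from by
        simp [PySem.Set.add, PySem.Set.contains, hmem]]
      rw [ih hndt (s ++ [(x, y)]) x]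
      have hfe : t.filter (fun z => !decide ((x, z) ∈ s ++ [(x, y)]))
          = t.filter (fun z => !decide ((x, z) ∈ s)) := by
        apply List.filter_congr
        intro z hz
        have hzy : z ≠ y := fun hzy => hyt (hzy ▸ hz)
        simp [List.mem_append, hzy]
      rw [hfe]
      simp [hmem]

-- one column step: output equality and invariant preservation
theorem pv_colstep (x y0 y1 : Int) (s : List (Int × Int)) (d : PySem.Dict Int (List (Int × Int)))
    (hInv : pvInv s d) (hy : y0 ≤ y1) :
    (PySem.List.pyRange y0 (y1 + 1) 1).foldl (fun s y => PySem.Set.add s (x, y)) s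
        = s ++ (pvGaps (d.getD x []) y0 y1).map (fun y => (x, y)) ∧
      pvInv (s ++ (pvGaps (d.getD x []) y0 y1).map (fun y => (x, y)))
        (d.insert x (pvInsert (d.getD x []) y0 y1)) := by
  obtain ⟨hnd, hok, hcov⟩ := hInv
  have hokx := hok x
  have hgaps : pvGaps (d.getD x []) y0 y1
      = (PySem.List.pyRange y0 (y1 + 1) 1).filter (fun y => !decide ((x, y) ∈ s)) := by
    rw [pv_gaps_eq (d.getD x []) y0 y1 hokx (by omega)]
    apply List.filter_congr
    intro y _
    have := hcov x y
    rcases h : covB (d.getD x []) y with _ | _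
    · have : (x, y) ∉ s := fun hm => by simp [h] at this; exact this hm
      simp [this]
    · have : (x, y) ∈ s := this.mpr h
      simp [this]
  have heq : (PySem.List.pyRange y0 (y1 + 1) 1).foldl (fun s y => PySem.Set.add s (x, y)) s
      = s ++ (pvGaps (d.getD x []) y0 y1).map (fun y => (x, y)) := by
    rw [hgaps]
    exact pv_acol (PySem.List.pyRange y0 (y1 + 1) 1) (PySem.List.nodup_pyRange_one y0 (y1 + 1)) s x
  refine ⟨heq, ?_, ?_, ?_⟩
  · -- Nodup
    rw [hgaps]
    apply List.Nodup.append hnd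
    · apply List.Nodup.map (fun a b h => by injection h)
      exact List.Nodup.filter _ (PySem.List.nodup_pyRange_one y0 (y1 + 1))
    · intro p hp hp2
      rcases List.mem_map.mp hp2 with ⟨y, hy, rfl⟩
      have := List.of_mem_filter hy
      simp at this
      exact this hp
  · -- ivsOK of all columns
    intro x'
    by_cases hx : x' = x
    · subst hx
      rw [PySem.Dict.getD_insert]
      rw [if_pos rfl]
      exact (pv_insert_spec (d.getD x' []) y0 y1 hokx hy).1
    · rw [PySem.Dict.getD_insert]
      rw [if_neg (by omega)]
      exact hok x'
  · -- coverage
    intro x' y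
    rw [PySem.Dict.getD_insert]
    by_cases hx : x' = x
    · subst hx
      rw [if_pos rfl]
      rw [(pv_insert_spec (d.getD x' []) y0 y1 hokx hy).2 y]
      constructor
      · intro hm
        rcases List.mem_append.mp hm with hm | hm
        · simp [(hcov x' y).mp hm]
        · rcases List.mem_map.mp hm with ⟨z, hz, hzz⟩
          have hzy : z = y := by injection hzz
          subst hzy
          rw [hgaps] at hz
          have := PySem.List.mem_pyRange_one.mp (List.mem_of_mem_filter hz)
          simp
          omega
      · intro hc
        simp only [Bool.or_eq_true, Bool.and_eq_true, decide_eq_true_eq] at hc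
        rcases hc with hc | hc
        · exact List.mem_append.mpr (Or.inl ((hcov x' y).mpr hc))
        · by_cases hin : (x', y) ∈ s
          · exact List.mem_append.mpr (Or.inl hin)
          · apply List.mem_append.mpr
            right
            apply List.mem_map.mpr
            refine ⟨y, ?_, rfl⟩
            rw [hgaps]
            apply List.mem_filter.mpr
            refine ⟨PySem.List.mem_pyRange_one.mpr (by omega), by simp [hin]⟩
    · rw [if_neg (by omega)]
      constructor
      · intro hm
        rcases List.mem_append.mp hm with hm | hm
        · exact (hcov x' y).mp hm
        · rcases List.mem_map.mp hm with ⟨z, hz, hzz⟩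
          exact absurd (congrArg Prod.fst hzz) (by simpa using fun h => hx ((by simpa using h : _ = _)).symm)
      · intro hc
        exact List.mem_append.mpr (Or.inl ((hcov x' y).mpr hc))

-- the fold over one obstacle's columns, simultaneously on both sides
theorem pv_xfold (y0 y1 : Int) (hy : y0 ≤ y1) :
    ∀ (xs : List Int) (s : List (Int × Int)) (d : PySem.Dict Int (List (Int × Int))), pvInv s d →
    xs.foldl (fun s x => (PySem.List.pyRange y0 (y1 + 1) 1).foldl
        (fun s y => PySem.Set.add s (x, y)) s) s
      = (xs.foldl (fun st x =>
          (st.1 ++ (pvGaps (st.2.getD x []) y0 y1).map (fun y => (x, y)),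
           st.2.insert x (pvInsert (st.2.getD x []) y0 y1))) (s, d)).1 ∧
    pvInv (xs.foldl (fun st x =>
          (st.1 ++ (pvGaps (st.2.getD x []) y0 y1).map (fun y => (x, y)),
           st.2.insert x (pvInsert (st.2.getD x []) y0 y1))) (s, d)).1
        (xs.foldl (fun st x =>
          (st.1 ++ (pvGaps (st.2.getD x []) y0 y1).map (fun y => (x, y)),
           st.2.insert x (pvInsert (st.2.getD x []) y0 y1))) (s, d)).2 := by
  intro xs
  induction xs with
  | nil => intro s d hInv; exact ⟨rfl, hInv⟩
  | cons x t ih =>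
    intro s d hInv
    obtain ⟨heq, hInv'⟩ := pv_colstep x y0 y1 s d hInv hy
    simp only [List.foldl_cons]
    rw [heq]
    exact ih _ _ hInv'

-- the fold over the obstacle list, simultaneously on both sides
theorem pv_obfold (width height c : Int) :
    ∀ (ps : List (Int × Int)) (s : List (Int × Int)) (d : PySem.Dict Int (List (Int × Int))),
      pvInv s d →
    ps.foldl (fun s p =>
        (PySem.List.pyRange (max 0 (p.1 - c)) (min (width - 1) (p.1 + c) + 1) 1).foldl
          (fun s x => (PySem.List.pyRange (max 0 (p.2 - c)) (min (height - 1) (p.2 + c) + 1) 1).foldl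
            (fun s y => PySem.Set.add s (x, y)) s) s) s
      = (ps.foldl (fun st p =>
          let x0 := max 0 (p.1 - c)
          let x1 := min (width - 1) (p.1 + c)
          let y0 := max 0 (p.2 - c)
          let y1 := min (height - 1) (p.2 + c)
          if x0 > x1 ∨ y0 > y1 then st
          else (PySem.List.pyRange x0 (x1 + 1) 1).foldl (fun st x =>
            let ivs := st.2.getD x []
            (st.1 ++ (pvGaps ivs y0 y1).map (fun y => (x, y)),
             st.2.insert x (pvInsert ivs y0 y1))) st) (s, d)).1 ∧
    pvInv ((ps.foldl (fun st p =>
          let x0 := max 0 (p.1 - c)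
          let x1 := min (width - 1) (p.1 + c)
          let y0 := max 0 (p.2 - c)
          let y1 := min (height - 1) (p.2 + c)
          if x0 > x1 ∨ y0 > y1 then st
          else (PySem.List.pyRange x0 (x1 + 1) 1).foldl (fun st x =>
            let ivs := st.2.getD x []
            (st.1 ++ (pvGaps ivs y0 y1).map (fun y => (x, y)),
             st.2.insert x (pvInsert ivs y0 y1))) st) (s, d)).1)
        ((ps.foldl (fun st p =>
          let x0 := max 0 (p.1 - c)
          let x1 := min (width - 1) (p.1 + c)
          let y0 := max 0 (p.2 - c)
          let y1 := min (height - 1) (p.2 + c)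
          if x0 > x1 ∨ y0 > y1 then st
          else (PySem.List.pyRange x0 (x1 + 1) 1).foldl (fun st x =>
            let ivs := st.2.getD x []
            (st.1 ++ (pvGaps ivs y0 y1).map (fun y => (x, y)),
             st.2.insert x (pvInsert ivs y0 y1))) st) (s, d)).2) := by
  intro ps
  induction ps with
  | nil => intro s d hInv; exact ⟨rfl, hInv⟩
  | cons p t ih =>
    intro s d hInv
    simp only [List.foldl_cons]
    set x0 := max 0 (p.1 - c) with hx0
    set x1 := min (width - 1) (p.1 + c) with hx1
    set y0 := max 0 (p.2 - c) with hy0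
    set y1 := min (height - 1) (p.2 + c) with hy1
    by_cases hguard : x0 > x1 ∨ y0 > y1
    · -- the obstacle contributes nothing on either side
      have hA : (PySem.List.pyRange x0 (x1 + 1) 1).foldl
          (fun s x => (PySem.List.pyRange y0 (y1 + 1) 1).foldl
            (fun s y => PySem.Set.add s (x, y)) s) s = s := by
        rcases hguard with hg | hg
        · have h0 : PySem.List.pyRange x0 (x1 + 1) 1 = [] :=
            PySem.List.pyRange_one_eq_nil (by omega)
          rw [h0]
          rfl
        · have hempty : PySem.List.pyRange y0 (y1 + 1) 1 = [] :=
            PySem.List.pyRange_one_eq_nil (by omega)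
          calc (PySem.List.pyRange x0 (x1 + 1) 1).foldl
                (fun s x => (PySem.List.pyRange y0 (y1 + 1) 1).foldl
                  (fun s y => PySem.Set.add s (x, y)) s) s
              = (PySem.List.pyRange x0 (x1 + 1) 1).foldl (fun s _ => s) s := by
                apply PySem.List.foldl_congr_mem
                intro s' x _
                rw [hempty]
                rfl
            _ = s := List.foldl_fixed _
      rw [hA, if_pos hguard]
      exact ih s d hInv
    · rw [if_neg hguard]
      obtain ⟨heq, hInv'⟩ := pv_xfold y0 y1 (by omega) (PySem.List.pyRange x0 (x1 + 1) 1) s d hInv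
      rw [heq]
      exact ih _ _ hInv'

-- ===== VERDICT (by name: the statement is the Claim_ definition above) =====
theorem inflate_obstacles_spec : Claim_equal_inflate_obstacles := by
  intro obstacles width height c _
  unfold Spec_inflate_obstacles inflate_obstacles inflate_obstacles_alt
  by_cases hc : c ≤ 0
  · simp [hc]
  · simp only [hc, if_false]
    have hInv0 : pvInv [] PySem.Dict.empty := by
      refine ⟨List.nodup_nil, ?_, ?_⟩
      · intro x
        rw [PySem.Dict.getD_empty]
        trivial
      · intro x y
        rw [PySem.Dict.getD_empty]
        simp [covB]
    have hA : (PySem.Set.ofList obstacles).foldl (fun inflated p =>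
        (PySem.List.pyRange (-c) (c + 1) 1).foldl (fun inflated dx =>
          (PySem.List.pyRange (-c) (c + 1) 1).foldl (fun inflated dy =>
            let nx := p.1 + dx
            let ny := p.2 + dy
            if (0 ≤ nx ∧ nx < width) ∧ (0 ≤ ny ∧ ny < height) then
              PySem.Set.add inflated (nx, ny)
            else inflated) inflated) inflated) PySem.Set.empty
        = (PySem.Set.ofList obstacles).foldl (fun s p =>
            (PySem.List.pyRange (max 0 (p.1 - c)) (min (width - 1) (p.1 + c) + 1) 1).foldl
              (fun s x => (PySem.List.pyRange (max 0 (p.2 - c)) (min (height - 1) (p.2 + c) + 1) 1).foldl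
                (fun s y => PySem.Set.add s (x, y)) s) s) [] := by
      apply PySem.List.foldl_congr_mem
      intro acc p _
      exact pv_body_eq width height c p.1 p.2 acc
    rw [hA]
    obtain ⟨heq, hInvF⟩ := pv_obfold width height c (PySem.Set.ofList obstacles) [] PySem.Dict.empty hInv0
    rw [PySem.List.dedup_eq_ofList]
    rw [heq]
    exact (PySem.Set.ofList_eq_self_of_nodup _ hInvF.1).symm
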